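-- pv_equiv track=rewrite | github.com/EnernityTwinkle/KBQA-QueryGraphSelection | ckbqa/src/rerank/build_data/select_1_n.py | selectTopBasedNegLow
-- ===== SOURCE A (Python) =====
-- def selectTopBasedNegLow(qid2data, N):
--     qid2dataNew = {}
--     for qid in qid2data:
--         qid2dataNew[qid] = []
--         for candPos in qid2data[qid][1]:
--             if(len(qid2data[qid][0]) > 0):
--                 qid2dataNew[qid].append(candPos)
--                 negCands = qid2data[qid][0]
--                 negNum = len(negCands)
--                 for i in range(N):
--                     qid2dataNew[qid].append(negCands[-1 - (i % negNum)])
--     return qid2dataNew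
-- ===== SOURCE B (Python) =====
-- def selectTopBasedNegLow(qid2data, N):
--     qid2dataNew = {}
--     for qid in qid2data:
--         negCands = qid2data[qid][0]
--         pos = qid2data[qid][1]
--         if not negCands:
--             qid2dataNew[qid] = []
--             continue
--         k = max(N, 0)
--         reps = -(-k // len(negCands))
--         negSeq = (negCands[::-1] * reps)[:k]
--         qid2dataNew[qid] = [x for p in pos for x in (p, *negSeq)]
--     return qid2dataNew
-- ===== Notes on version B (the rewrite author's own statement) =====
-- stated objective: alternative
-- what changed: B precomputes each query's cyclic negative block once by reversing, repeating ceil(N/len) times and truncating to N, then flat-maps it behind every positive candidate, instead of A's nested per-positive loop of N modular negative-index lookups appended one element at a time.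
import Mathlib
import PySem

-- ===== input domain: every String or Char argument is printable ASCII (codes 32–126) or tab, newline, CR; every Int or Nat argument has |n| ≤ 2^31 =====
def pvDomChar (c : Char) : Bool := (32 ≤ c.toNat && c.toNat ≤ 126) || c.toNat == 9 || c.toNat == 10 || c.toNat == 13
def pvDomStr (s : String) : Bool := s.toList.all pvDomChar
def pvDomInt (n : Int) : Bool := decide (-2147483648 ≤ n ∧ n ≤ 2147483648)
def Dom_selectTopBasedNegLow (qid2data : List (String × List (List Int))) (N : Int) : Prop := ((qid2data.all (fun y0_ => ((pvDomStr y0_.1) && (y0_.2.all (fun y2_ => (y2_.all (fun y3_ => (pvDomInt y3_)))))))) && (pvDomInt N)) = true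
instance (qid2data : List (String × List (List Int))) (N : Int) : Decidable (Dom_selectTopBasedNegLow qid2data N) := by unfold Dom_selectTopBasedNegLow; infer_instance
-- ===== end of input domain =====

-- B builds each query's cyclic negative block once (reverse, repeat, truncate) and flattens it
-- behind every positive candidate, instead of A's per-positive inner loop of modular negative
-- indexing; objective: alternative decomposition, same output.

-- ===== PORT A =====
-- literal transliteration of A: dict-insertion loop = foldl appending one (qid, list) pair;
-- qid2data[qid][0] / [1] are pyGetD (total under Pre_, which demands length ≥ 2);
-- negCands[-1 - (i % negNum)] is pyGetD with Python's negative index and PySem.Int.mod.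
def selectTopBasedNegLow (qid2data : List (String × List (List Int))) (N : Int) : List (String × List Int) :=
  qid2data.foldl (fun qid2dataNew qv =>
    let cur : List Int :=
      (PySem.List.pyGetD qv.2 1 []).foldl (fun cur candPos =>
        if (PySem.List.pyGetD qv.2 0 []).length > 0 then
          let negCands := PySem.List.pyGetD qv.2 0 []
          let negNum : Int := negCands.length
          (PySem.List.pyRange 0 N 1).foldl (fun cur2 i =>
            cur2 ++ [PySem.List.pyGetD negCands (-1 - PySem.Int.mod i negNum) 0]) (cur ++ [candPos])
        else cur) []
    qid2dataNew ++ [(qv.1, cur)]) []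

-- ===== PORT B =====
-- negSeq = (negCands[::-1] * reps)[:k]  with k = max(N, 0), reps = -(-k // len(negCands))
def pvNegSeq (negCands : List Int) (N : Int) : List Int :=
  let k : Nat := (max N 0).toNat
  let reps : Nat := (-(PySem.Int.floordiv (-(k : Int)) (negCands.length : Int))).toNat
  ((List.replicate reps negCands.reverse).flatten).take k

def selectTopBasedNegLow_alt (qid2data : List (String × List (List Int))) (N : Int) : List (String × List Int) :=
  qid2data.map (fun qv =>
    let negCands := PySem.List.pyGetD qv.2 0 []
    let pos := PySem.List.pyGetD qv.2 1 []
    if negCands.isEmpty then (qv.1, ([] : List Int))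
    else (qv.1, pos.flatMap (fun p => p :: pvNegSeq negCands N)))

-- ===== PRECONDITION & SPEC =====
-- Pre_ excludes exactly the inputs where Python A raises IndexError: a query whose value list
-- has fewer than two elements (qid2data[qid][1] / [0] are read unconditionally).
def Pre_selectTopBasedNegLow (qid2data : List (String × List (List Int))) (N : Int) : Prop :=
  ∀ qv ∈ qid2data, 2 ≤ qv.2.length
instance (qid2data : List (String × List (List Int))) (N : Int) : Decidable (Pre_selectTopBasedNegLow qid2data N) := by unfold Pre_selectTopBasedNegLow; infer_instance

def pvWitness_selectTopBasedNegLow : (List (String × List (List Int))) × Int :=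
  ([("q0", [[1, 2], [3, 4]]), ("q1", [[], [5]])], 3)

def Spec_selectTopBasedNegLow (qid2data : List (String × List (List Int))) (N : Int) (out : List (String × List Int)) : Prop := out = selectTopBasedNegLow_alt qid2data N
instance (qid2data : List (String × List (List Int))) (N : Int) (out : List (String × List Int)) : Decidable (Spec_selectTopBasedNegLow qid2data N out) := by unfold Spec_selectTopBasedNegLow; infer_instance

-- ===== CLAIM (what is proved, stated in full; the proofs are below) =====
def Claim_equal_selectTopBasedNegLow : Prop := ∀ (qid2data : List (String × List (List Int))) (N : Int), Dom_selectTopBasedNegLow qid2data N → Pre_selectTopBasedNegLow qid2data N → Spec_selectTopBasedNegLow qid2data N (selectTopBasedNegLow qid2data N)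

-- ===== LEMMAS AND PROOFS =====

-- indexing into a flattened replication is cyclic indexing
lemma getElem?_flatten_replicate {α : Type} (xs : List α) (r j : Nat) (hj : j < r * xs.length) :
    ((List.replicate r xs).flatten)[j]? = xs[j % xs.length]? := by
  induction r generalizing j with
  | zero => simp at hj
  | succ r ih =>
    have hx : 0 < xs.length := by by_contra h; simp [Nat.eq_zero_of_not_pos h] at hj
    rw [List.replicate_succ, List.flatten_cons]
    by_cases hlt : j < xs.length
    · rw [List.getElem?_append_left hlt, Nat.mod_eq_of_lt hlt]
    · push_neg at hlt
      have hsm : (r + 1) * xs.length = xs.length + r * xs.length := by ring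
      rw [List.getElem?_append_right hlt, ih (j - xs.length) (by omega)]
      congr 1
      conv_lhs => rw [show j - xs.length = j - xs.length from rfl]
      conv_rhs => rw [show j = xs.length + (j - xs.length) by omega]
      rw [Nat.add_mod_left]

-- ceiling-division repetitions cover k elements
lemma pvNegSeq_reps_cover (n k : Nat) (hn : 0 < n) :
    k ≤ (-(PySem.Int.floordiv (-(k : Int)) (n : Int))).toNat * n := by
  set q : Int := -(PySem.Int.floordiv (-(k : Int)) (n : Int)) with hq
  have hspec : (q - 1) * (n : Int) < (k : Int) ∧ (k : Int) ≤ q * (n : Int) :=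
    (PySem.Int.neg_floordiv_neg_eq_iff_of_pos (a := (k : Int)) (b := (n : Int)) (q := q)
      (by exact_mod_cast hn)).mp rfl
  have hq0 : 0 ≤ q := by
    by_contra h
    push_neg at h
    have hlt : q * (n : Int) < 0 := mul_neg_of_neg_of_pos h (by exact_mod_cast hn)
    omega
  have : (k : Int) ≤ (q.toNat : Int) * (n : Int) := by
    rw [Int.toNat_of_nonneg hq0]; exact hspec.2
  exact_mod_cast this

-- A's inner range(N) comprehension of negative-modular lookups IS B's negSeq table
lemma negSeq_eq (neg : List Int) (hne : neg ≠ []) (N : Int) :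
    (PySem.List.pyRange 0 N 1).map
      (fun i => PySem.List.pyGetD neg (-1 - PySem.Int.mod i (neg.length : Int)) 0)
    = pvNegSeq neg N := by
  have hn : 0 < neg.length := List.length_pos_of_ne_nil hne
  simp only [pvNegSeq]
  rw [PySem.List.pyRange_one, List.map_map]
  set k := (max N 0).toNat with hkdef
  have hNk : (N - 0).toNat = k := by omega
  rw [hNk]
  set reps := (-(PySem.Int.floordiv (-(k : Int)) (neg.length : Int))).toNat with hrepsdef
  have hcov : k ≤ reps * neg.reverse.length := by
    rw [List.length_reverse]; exact pvNegSeq_reps_cover neg.length k hn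
  apply List.ext_getElem?
  intro j
  by_cases hj : j < k
  · rw [List.getElem?_map, List.getElem?_range hj, List.getElem?_take_of_lt hj,
        getElem?_flatten_replicate _ _ _ (lt_of_lt_of_le hj hcov), List.length_reverse]
    have hjm : j % neg.length < neg.length := Nat.mod_lt _ hn
    rw [List.getElem?_reverse (by omega), Option.map_some]
    have hidx : (-1 - PySem.Int.mod ((0 : Int) + (j : Int)) (neg.length : Int))
        = -(((1 + j % neg.length : Nat) : Int)) := by
      rw [zero_add,
        show PySem.Int.mod ((j : Int)) ((neg.length : Int)) = ((j % neg.length : Nat) : Int)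
          from by exact_mod_cast PySem.Int.mod_natCast j neg.length]
      push_cast; ring
    simp only [Function.comp_apply, hidx]
    rw [PySem.List.pyGetD_neg_natCast _ _ _ (by omega) (by omega)]
    rw [List.getElem?_eq_getElem (by omega)]
    have hi : neg.length - 1 - j % neg.length = neg.length - (1 + j % neg.length) := by omega
    simp only [hi]
  · rw [List.getElem?_eq_none, List.getElem?_eq_none]
    · exact le_trans (by rw [List.length_take]; exact min_le_left _ _) (Nat.le_of_not_lt hj)
    · simpa using Nat.le_of_not_lt hj

-- foldl over a constant function is the identity
lemma foldl_const_acc {α β : Type} (l : List α) (acc : β) :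
    l.foldl (fun a _ => a) acc = acc := by
  induction l generalizing acc with
  | nil => rfl
  | cons x xs ih => simpa using ih acc

-- per-query agreement of the two inner computations
lemma inner_eq (v : List (List Int)) (N : Int) :
    ((PySem.List.pyGetD v 1 []).foldl (fun cur candPos =>
        if (PySem.List.pyGetD v 0 []).length > 0 then
          (PySem.List.pyRange 0 N 1).foldl (fun cur2 i =>
            cur2 ++ [PySem.List.pyGetD (PySem.List.pyGetD v 0 []) (-1 - PySem.Int.mod i ((PySem.List.pyGetD v 0 []).length : Int)) 0]) (cur ++ [candPos])
        else cur) [])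
    = (if (PySem.List.pyGetD v 0 []).isEmpty then []
       else (PySem.List.pyGetD v 1 []).flatMap (fun p => p :: pvNegSeq (PySem.List.pyGetD v 0 []) N)) := by
  set neg := PySem.List.pyGetD v 0 [] with hneg
  set pos := PySem.List.pyGetD v 1 [] with hpos
  by_cases hnil : neg = []
  · rw [PySem.List.foldl_congr_mem pos _ (fun a _ => a) []
        (by intro acc x _; simp [hnil])]
    rw [foldl_const_acc, if_pos (by simp [hnil])]
  · rw [PySem.List.foldl_congr_mem pos _ (fun cur p => cur ++ (p :: pvNegSeq neg N)) []
        (by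
          intro acc p _
          rw [if_pos (List.length_pos_of_ne_nil hnil),
            PySem.List.foldl_append_singleton_eq_map, negSeq_eq neg hnil N]
          simp)]
    rw [PySem.List.foldl_append_eq_flatMap, if_neg (by simp [hnil])]
    simp

-- ===== VERDICT (by name: the statement is the Claim_ definition above) =====
theorem selectTopBasedNegLow_spec : Claim_equal_selectTopBasedNegLow := by
  intro qid2data N _ _
  unfold Spec_selectTopBasedNegLow selectTopBasedNegLow selectTopBasedNegLow_alt
  rw [PySem.List.foldl_append_singleton_eq_map]
  simp only [List.nil_append]
  apply List.map_congr_left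
  intro qv _
  have := inner_eq qv.2 N
  by_cases h : (PySem.List.pyGetD qv.2 0 []).isEmpty
  · simp only [h, if_pos] at this ⊢
    rw [this]
  · simp only [h, if_neg, Bool.false_eq_true, not_false_iff] at this ⊢
    rw [this]
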